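-- pv_equiv track=rewrite | github.com/PhillipSaint254/Long-Solution-Grading-v2 | Production/History - Hair Removal Techniques in Ancient Egypt and Their Historical Evidence/_six.py | count_references
-- ===== SOURCE A (Python) =====
-- def count_references(texts, methods_keywords):
--     counts = {method: 0 for method in methods_keywords}
--     for text in texts.values():
--         text_lower = text.lower()
--         for method, keywords in methods_keywords.items():
--             if any(kw in text_lower for kw in keywords):
--                 counts[method] += 1
--     return counts
-- ===== SOURCE B (Python) =====
-- def count_references(texts, methods_keywords):
--     # inverted index: keyword -> all methods listing it (each distinct keyword tested once per text)
--     index = {}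
--     for method, kws in methods_keywords.items():
--         for kw in kws:
--             index[kw] = index.get(kw, []) + [method]
--     # one hit-set of methods per text
--     hits = []
--     for text in texts.values():
--         tl = text.lower()
--         hit = set()
--         for kw, ms in index.items():
--             if kw in tl:
--                 hit.update(ms)
--         hits.append(hit)
--     return {m: sum(1 for h in hits if m in h) for m in methods_keywords}
-- ===== Notes on version B (the rewrite author's own statement) =====
-- stated objective: alternative
-- what changed: B replaces A's per-text nested scan over method rows with an inverted index keyword->methods built once, a hit-set of matched methods computed per text (each distinct keyword substring-tested once per text, shared keywords not retested per method), and counts read off the hit-sets, instead of A's mutable counter dict bumped inside a methods-inner loop.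
import Mathlib
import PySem

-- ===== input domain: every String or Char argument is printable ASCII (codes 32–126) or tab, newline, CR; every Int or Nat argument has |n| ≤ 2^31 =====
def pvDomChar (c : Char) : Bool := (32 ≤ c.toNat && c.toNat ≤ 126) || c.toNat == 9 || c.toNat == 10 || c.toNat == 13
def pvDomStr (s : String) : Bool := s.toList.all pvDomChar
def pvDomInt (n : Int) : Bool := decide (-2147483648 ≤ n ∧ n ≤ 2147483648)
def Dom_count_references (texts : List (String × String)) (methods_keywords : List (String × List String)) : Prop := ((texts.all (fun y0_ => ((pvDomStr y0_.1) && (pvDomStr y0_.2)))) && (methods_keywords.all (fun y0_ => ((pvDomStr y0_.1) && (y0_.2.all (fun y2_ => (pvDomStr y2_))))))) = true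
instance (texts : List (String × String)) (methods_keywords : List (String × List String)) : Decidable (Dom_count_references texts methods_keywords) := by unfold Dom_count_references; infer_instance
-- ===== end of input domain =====

-- B builds an inverted index keyword→methods once, computes one hit-set of methods per text
-- (each distinct keyword scanned once per text), and reads the counts off the hit-sets,
-- instead of A's nested per-method any-keyword scan with a mutable counter dict; alternative algorithm, same cost in the worst case.

-- ===== PORT A =====
def count_references (texts : List (String × String)) (methods_keywords : List (String × List String)) : List (String × Int) :=
  let td := PySem.Dict.ofList texts
  let md := PySem.Dict.ofList methods_keywords
  -- counts = {method: 0 for method in methods_keywords}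
  let counts := md.keys.foldl (fun d m => d.insert m (0 : Int)) PySem.Dict.empty
  -- for text in texts.values(): for method, keywords in methods_keywords.items(): ...
  let counts := td.values.foldl (fun counts text =>
    let text_lower := PySem.Str.lower text
    md.items.foldl (fun counts p =>
      if p.2.any (fun kw => PySem.Str.isIn kw text_lower) then
        counts.insert p.1 (counts.getD p.1 0 + 1)
      else counts) counts) counts
  counts.items

-- ===== PORT B =====
def count_references_alt (texts : List (String × String)) (methods_keywords : List (String × List String)) : List (String × Int) :=
  let md := PySem.Dict.ofList methods_keywords
  -- index = {}; for method, kws in methods_keywords.items(): for kw in kws: index[kw] = index.get(kw, []) + [method]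
  let index := md.items.foldl (fun idx p =>
      p.2.foldl (fun idx kw => idx.insert kw (idx.getD kw [] ++ [p.1])) idx)
    (PySem.Dict.empty : PySem.Dict String (List String))
  -- hits = []; for text in texts.values(): tl = text.lower(); hit = set(); for kw, ms in index.items(): if kw in tl: hit.update(ms); hits.append(hit)
  let hits := (PySem.Dict.ofList texts).values.map (fun t =>
      let tl := PySem.Str.lower t
      index.items.foldl (fun s q =>
        if PySem.Str.isIn q.1 tl then PySem.Set.update s q.2 else s)
        (PySem.Set.empty : PySem.Set String))
  -- {m: sum(1 for h in hits if m in h) for m in methods_keywords}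
  (md.keys.foldl (fun d m =>
      d.insert m ((hits.countP (fun h => PySem.Set.contains h m) : Int)))
    (PySem.Dict.empty : PySem.Dict String Int)).items

-- ===== PRECONDITION & SPEC =====
def Spec_count_references (texts : List (String × String)) (methods_keywords : List (String × List String)) (out : List (String × Int)) : Prop := out = count_references_alt texts methods_keywords
instance (texts : List (String × String)) (methods_keywords : List (String × List String)) (out : List (String × Int)) : Decidable (Spec_count_references texts methods_keywords out) := by unfold Spec_count_references; infer_instance

-- ===== CLAIM (what is proved, stated in full; the proofs are below) =====
def Claim_equal_count_references : Prop := ∀ (texts : List (String × String)) (methods_keywords : List (String × List String)), Dom_count_references texts methods_keywords → Spec_count_references texts methods_keywords (count_references texts methods_keywords)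

-- ===== LEMMAS AND PROOFS =====

-- Predicate: does method row p match text t (A lowers t in the loop; B pre-lowers).
def pvQ (p : String × List String) (t : String) : Bool :=
  p.2.any (fun kw => PySem.Str.isIn kw (PySem.Str.lower t))

-- Inner loop of A: one pass over the method rows, bumping the counter of each matching row.
theorem pv_inner (t : String) :
    ∀ (ps : List (String × List String)) (pre : List (String × Int)) (d : PySem.Dict String Int)
      (g : (String × List String) → Int),
      d.items = pre ++ ps.map (fun p => (p.1, g p)) →
      (pre.map Prod.fst ++ ps.map Prod.fst).Nodup →
      (ps.foldl (fun counts p =>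
          if p.2.any (fun kw => PySem.Str.isIn kw (PySem.Str.lower t)) then
            counts.insert p.1 (counts.getD p.1 0 + 1)
          else counts) d).items
        = pre ++ ps.map (fun p => (p.1, g p + (if pvQ p t then 1 else 0))) := by
  intro ps
  induction ps with
  | nil => intro pre d g hitems _; simpa using hitems
  | cons p ps ih =>
    intro pre d g hitems hnodup
    have hkeys : d.keys = pre.map Prod.fst ++ (p.1 :: ps.map Prod.fst) := by
      simp [PySem.Dict.keys, hitems]
    have hknd : d.keys.Nodup := by
      rw [hkeys]; simpa using hnodup
    have hp1_pre : ∀ q ∈ pre, q.1 ≠ p.1 := by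
      intro q hq
      exact (List.nodup_append.mp hnodup).2.2 q.1 (List.mem_map_of_mem hq) p.1 (by simp)
    have hp1_ps : ∀ q ∈ ps, q.1 ≠ p.1 := by
      intro q hq h
      have : (p.1 :: ps.map Prod.fst).Nodup := (List.nodup_append.mp hnodup).2.1
      exact (List.nodup_cons.mp this).1 (h ▸ List.mem_map_of_mem hq)
    simp only [List.foldl_cons]
    by_cases hq : p.2.any (fun kw => PySem.Str.isIn kw (PySem.Str.lower t)) = true
    · -- matching row: counts[p.1] += 1
      have hmem : (p.1, g p) ∈ d.items := by rw [hitems]; simp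
      have hget : d.get? p.1 = some (g p) := PySem.Dict.get?_of_mem_items d hmem hknd
      have hgetD : d.getD p.1 0 = g p := PySem.Dict.getD_of_get?_eq_some d 0 hget
      have hcont : d.contains p.1 = true := by
        rw [PySem.Dict.contains_eq_isSome_get?, hget]; rfl
      have hins : (d.insert p.1 (d.getD p.1 0 + 1)).items
          = pre ++ (p.1, g p + 1) :: ps.map (fun q => (q.1, g q)) := by
        rw [PySem.Dict.items_insert_of_contains d _ hcont, hitems, hgetD]
        rw [List.map_append, List.map_cons]
        congr 1
        · conv_rhs => rw [← List.map_id pre]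
          apply List.map_congr_left
          intro q hq'
          simp [hp1_pre q hq']
        · refine List.cons_eq_cons.mpr ⟨by simp, ?_⟩
          rw [List.map_map]
          apply List.map_congr_left
          intro q hq'
          simp [Function.comp, hp1_ps q hq']
      have hq' : pvQ p t = true := hq
      rw [hq]
      simp only [if_true]
      have := ih (pre ++ [(p.1, g p + 1)]) (d.insert p.1 (d.getD p.1 0 + 1)) g
        (by rw [hins]; simp) (by simpa using hnodup)
      rw [this]
      simp [hq']
    · have hq' : pvQ p t = false := Bool.eq_false_iff.mpr hq
      rw [if_neg hq]
      have := ih (pre ++ [(p.1, g p)]) d g (by rw [hitems]; simp) (by simpa using hnodup)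
      rw [this]
      simp [hq']

-- Outer loop of A: folding the inner pass over the texts accumulates the per-method match count.
theorem pv_outer (ps : List (String × List String)) (hnd : (ps.map Prod.fst).Nodup) :
    ∀ (ts : List String) (d : PySem.Dict String Int) (g : (String × List String) → Int),
      d.items = ps.map (fun p => (p.1, g p)) →
      (ts.foldl (fun counts text =>
          ps.foldl (fun counts p =>
            if p.2.any (fun kw => PySem.Str.isIn kw (PySem.Str.lower text)) then
              counts.insert p.1 (counts.getD p.1 0 + 1)
            else counts) counts) d).items
        = ps.map (fun p => (p.1, g p + (ts.countP (fun t => pvQ p t) : Int))) := by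
  intro ts
  induction ts with
  | nil => intro d g h; simpa using h
  | cons t ts ih =>
    intro d g h
    simp only [List.foldl_cons]
    have hin := pv_inner t ps [] d g (by simp only [List.nil_append]; exact h) (by simpa using hnd)
    rw [List.nil_append] at hin
    have := ih _ (fun p => g p + (if pvQ p t then 1 else 0)) hin
    rw [this]
    apply List.map_congr_left
    intro p _
    have : (List.countP (fun t => pvQ p t) (t :: ts) : Int)
        = (if pvQ p t then 1 else 0) + (ts.countP (fun t => pvQ p t) : Int) := by
      rw [List.countP_cons]
      by_cases hq : pvQ p t <;> simp [hq] <;> omega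
    rw [this]; ring_nf

-- The initialisation loop of A produces items (m, 0) for the method keys, in order.
theorem pv_init (md : PySem.Dict String (List String)) (hnd : md.keys.Nodup) :
    (md.keys.foldl (fun d m => d.insert m (0 : Int)) PySem.Dict.empty).items
      = md.items.map (fun p => (p.1, (0 : Int))) := by
  have h := PySem.Dict.items_foldl_insert_fresh (d := (PySem.Dict.empty : PySem.Dict String Int))
    (l := md.keys) (k := fun m => m) (v := fun _ => (0 : Int))
    (by intro a _; simp [PySem.Dict.contains_empty]) (by simpa using hnd)
  rw [h]
  have he : (PySem.Dict.empty : PySem.Dict String Int).items = [] := rfl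
  simp [he, PySem.Dict.keys, List.map_map, Function.comp]

-- B's hit-set fold: membership characterisation.
theorem pv_hit_mem (tl : String) (m : String) :
    ∀ (l : List (String × List String)) (s0 : PySem.Set String),
      m ∈ l.foldl (fun s q => if PySem.Str.isIn q.1 tl then PySem.Set.update s q.2 else s) s0
        ↔ m ∈ s0 ∨ ∃ q ∈ l, PySem.Str.isIn q.1 tl = true ∧ m ∈ q.2 := by
  intro l
  induction l with
  | nil => intro s0; simp
  | cons q l ih =>
    intro s0
    simp only [List.foldl_cons]
    by_cases hc : PySem.Str.isIn q.1 tl = true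
    · rw [if_pos hc, ih]
      simp only [PySem.Set.mem_update, List.mem_cons]
      constructor
      · rintro ((h | h) | ⟨r, hr, hcr, hmr⟩)
        · exact Or.inl h
        · exact Or.inr ⟨q, Or.inl rfl, hc, h⟩
        · exact Or.inr ⟨r, Or.inr hr, hcr, hmr⟩
      · rintro (h | ⟨r, (rfl | hr), hcr, hmr⟩)
        · exact Or.inl (Or.inl h)
        · exact Or.inl (Or.inr hmr)
        · exact Or.inr ⟨r, hr, hcr, hmr⟩
    · rw [if_neg hc, ih]
      constructor
      · rintro (h | ⟨r, hr, hcr, hmr⟩)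
        · exact Or.inl h
        · exact Or.inr ⟨r, List.mem_cons_of_mem _ hr, hcr, hmr⟩
      · rintro (h | ⟨r, hr, hcr, hmr⟩)
        · exact Or.inl h
        · rcases List.mem_cons.mp hr with rfl | hr'
          · exact absurd hcr hc
          · exact Or.inr ⟨r, hr', hcr, hmr⟩

-- Inner index build (one method row): lookup characterisation.
theorem pv_index_inner (m0 : String) :
    ∀ (kws : List String) (idx : PySem.Dict String (List String)) (kw m : String),
      ((∃ ms, (kws.foldl (fun idx kw => idx.insert kw (idx.getD kw [] ++ [m0])) idx).get? kw = some ms ∧ m ∈ ms)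
        ↔ (∃ ms, idx.get? kw = some ms ∧ m ∈ ms) ∨ (kw ∈ kws ∧ m = m0)) := by
  intro kws
  induction kws with
  | nil => intro idx kw m; simp
  | cons k0 kws ih =>
    intro idx kw m
    simp only [List.foldl_cons]
    rw [ih]
    by_cases hk : kw = k0
    · subst hk
      rw [PySem.Dict.get?_insert_self]
      have hD : idx.getD kw [] = (idx.get? kw).getD [] := PySem.Dict.getD_eq_get?_getD idx kw []
      constructor
      · rintro (⟨ms, hms, hm⟩ | ⟨_, rfl⟩)
        · cases hms' : idx.get? kw with
          | none => injection hms with h; rw [hD, hms'] at h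
                    rcases List.mem_append.mp (h ▸ hm) with h' | h'
                    · simp at h'
                    · exact Or.inr ⟨by simp, by simpa using h'⟩
          | some v => injection hms with h; rw [hD, hms'] at h
                      rcases List.mem_append.mp (h ▸ hm) with h' | h'
                      · exact Or.inl ⟨v, rfl, h'⟩
                      · exact Or.inr ⟨by simp, by simpa using h'⟩
        · exact Or.inr ⟨by simp, rfl⟩
      · rintro (⟨ms, hms, hm⟩ | ⟨_, rfl⟩)
        · exact Or.inl ⟨_, rfl, by rw [hD, hms]; exact List.mem_append_left _ hm⟩
        · exact Or.inl ⟨_, rfl, List.mem_append_right _ (by simp)⟩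
    · rw [PySem.Dict.get?_insert_of_ne idx _ hk]
      constructor
      · rintro (h | ⟨hkw, rfl⟩)
        · exact Or.inl h
        · exact Or.inr ⟨List.mem_cons_of_mem _ hkw, rfl⟩
      · rintro (h | ⟨hkw, rfl⟩)
        · exact Or.inl h
        · rcases List.mem_cons.mp hkw with rfl | hkw'
          · exact absurd rfl hk
          · exact Or.inr ⟨hkw', rfl⟩

-- Full index build over the method rows: lookup characterisation.
theorem pv_index_full :
    ∀ (rows : List (String × List String)) (idx : PySem.Dict String (List String)) (kw m : String),
      ((∃ ms, (rows.foldl (fun idx p => p.2.foldl (fun idx kw => idx.insert kw (idx.getD kw [] ++ [p.1])) idx) idx).get? kw = some ms ∧ m ∈ ms)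
        ↔ (∃ ms, idx.get? kw = some ms ∧ m ∈ ms) ∨ ∃ r ∈ rows, r.1 = m ∧ kw ∈ r.2) := by
  intro rows
  induction rows with
  | nil => intro idx kw m; simp
  | cons p rows ih =>
    intro idx kw m
    simp only [List.foldl_cons]
    rw [ih, pv_index_inner]
    constructor
    · rintro ((h | ⟨hkw, rfl⟩) | ⟨r, hr, h1, h2⟩)
      · exact Or.inl h
      · exact Or.inr ⟨p, List.mem_cons_self .., rfl, hkw⟩
      · exact Or.inr ⟨r, List.mem_cons_of_mem _ hr, h1, h2⟩
    · rintro (h | ⟨r, hr, h1, h2⟩)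
      · exact Or.inl (Or.inl h)
      · rcases List.mem_cons.mp hr with rfl | hr'
        · exact Or.inl (Or.inr ⟨h2, h1.symm⟩)
        · exact Or.inr ⟨r, hr', h1, h2⟩

-- The index build keeps keys Nodup.
theorem pv_index_nodup :
    ∀ (rows : List (String × List String)) (idx : PySem.Dict String (List String)),
      idx.keys.Nodup →
      (rows.foldl (fun idx p => p.2.foldl (fun idx kw => idx.insert kw (idx.getD kw [] ++ [p.1])) idx) idx).keys.Nodup := by
  intro rows
  induction rows with
  | nil => intro idx h; simpa using h
  | cons p rows ih =>
    intro idx h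
    simp only [List.foldl_cons]
    exact ih _ (PySem.Dict.nodup_keys_foldl_insert _ _ _ h)

-- ===== VERDICT (by name: the statement is the Claim_ definition above) =====
set_option maxHeartbeats 1000000 in
theorem count_references_spec : Claim_equal_count_references := by
  intro texts methods_keywords _
  unfold Spec_count_references count_references count_references_alt
  set md := PySem.Dict.ofList methods_keywords with hmd
  have hndk : md.keys.Nodup := PySem.Dict.nodup_keys_ofList methods_keywords
  have hnd : (md.items.map Prod.fst).Nodup := by
    simpa [PySem.Dict.keys] using hndk
  -- A's side
  have hinit := pv_init md hndk
  have houtA := pv_outer md.items hnd ((PySem.Dict.ofList texts).values) _ (fun _ => (0 : Int)) hinit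
  -- B's side: the result dict is fresh inserts over distinct keys
  have houtB := PySem.Dict.items_foldl_insert_fresh (d := (PySem.Dict.empty : PySem.Dict String Int))
    (l := md.keys) (k := fun m => m)
    (v := fun m => (((PySem.Dict.ofList texts).values.map (fun t =>
        md.items.foldl (fun idx p => p.2.foldl (fun idx kw => idx.insert kw (idx.getD kw [] ++ [p.1])) idx) (PySem.Dict.empty : PySem.Dict String (List String)) |>.items.foldl
          (fun s q => if PySem.Str.isIn q.1 (PySem.Str.lower t) then PySem.Set.update s q.2 else s)
          (PySem.Set.empty : PySem.Set String))).countP (fun h => PySem.Set.contains h m) : Int))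
    (by intro a _; simp [PySem.Dict.contains_empty]) (by simpa using hndk)
  simp only []
  rw [houtA, houtB]
  have he : (PySem.Dict.empty : PySem.Dict String Int).items = [] := rfl
  rw [he, List.nil_append]
  -- both sides are maps over the method rows / keys
  have hkeys : md.keys = md.items.map Prod.fst := rfl
  rw [hkeys, List.map_map]
  apply List.map_congr_left
  intro p hp
  simp only [Function.comp]
  refine Prod.ext rfl ?_
  simp only [zero_add]
  congr 1
  -- countP over hit-sets = countP over texts of pvQ
  rw [List.countP_map]
  apply List.countP_congr
  intro t _
  simp only [Function.comp]
  -- membership in the hit-set of t ↔ pvQ p t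
  set idx := md.items.foldl (fun idx p => p.2.foldl (fun idx kw => idx.insert kw (idx.getD kw [] ++ [p.1])) idx) (PySem.Dict.empty : PySem.Dict String (List String)) with hidx
  have hidxnd : idx.keys.Nodup := pv_index_nodup md.items _ (by simp [PySem.Dict.keys_empty])
  simp only [pvQ]
  rw [PySem.Set.contains_iff, pv_hit_mem]
  have hLHS : (∃ q ∈ idx.items, PySem.Str.isIn q.1 (PySem.Str.lower t) = true ∧ p.1 ∈ q.2)
      ↔ ∃ kw, PySem.Str.isIn kw (PySem.Str.lower t) = true ∧ ∃ ms, idx.get? kw = some ms ∧ p.1 ∈ ms := by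
    constructor
    · rintro ⟨q, hq, hc, hm⟩
      exact ⟨q.1, hc, q.2, PySem.Dict.get?_of_mem_items idx (by simpa using hq) hidxnd, hm⟩
    · rintro ⟨kw, hc, ms, hget, hm⟩
      exact ⟨(kw, ms), PySem.Dict.mem_items_of_get?_eq_some idx hget, hc, hm⟩
  constructor
  · intro h
    rcases List.any_eq_true.mp h with ⟨kw, hkw, hc⟩
    refine Or.inr (hLHS.mpr ⟨kw, hc, ?_⟩)
    rw [hidx]
    exact (pv_index_full md.items _ kw p.1).mpr (Or.inr ⟨p, hp, rfl, hkw⟩)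
  · rintro (h | h)
    · simp [PySem.Set.empty] at h
    · rcases hLHS.mp h with ⟨kw, hc, hms⟩
      rw [hidx] at hms
      rcases (pv_index_full md.items _ kw p.1).mp hms with ⟨ms, hget, _⟩ | ⟨r, hr, h1, h2⟩
      · rw [PySem.Dict.get?_empty] at hget; cases hget
      · -- r and p are rows of md.items with the same key, so r = p
        have hrp : r = p := List.inj_on_of_nodup_map hnd hr hp h1
        subst hrp
        exact List.any_eq_true.mpr ⟨kw, h2, hc⟩
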